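-- pv_equiv track=rewrite | github.com/YamitCohenTsedek/AI-learning-algorithms | learning_algorithms.py | attributes_possible_values
-- ===== SOURCE A (Python) =====
-- def attributes_possible_values(data_set):
--     """
--     Create a list of sets - the index of each set in the list corresponds to the attribute index. The elements
--     of the set represent all the possible values of the attribute.
--
--     :param data_set: the data set of the examples.
--     :returns: list of sets of all the possible values of the attributes.
--     """
--     attributes_values = []
--     for i in range(len(data_set[0]) - 1):
--         attributes_values.append(set())
--     for example in data_set:
--         for i in range(len(example) - 1):
--             attributes_values[i].add(example[i])
--     return attributes_values
-- ===== SOURCE B (Python) =====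
-- def attributes_possible_values(data_set):
--     cells = {(i, value) for row in data_set for i, value in enumerate(row[:-1])}
--     return [{value for i, value in cells if i == column}
--             for column in range(len(data_set[0]) - 1)]
-- ===== Notes on version B (the rewrite author's own statement) =====
-- stated objective: alternative
-- what changed: B first flattens the whole table into one set of (column, value) cells taken from each row's feature prefix row[:-1], then builds each attribute's set by filtering that cell set per column, instead of A's row-major scatter of values into pre-allocated per-column sets; Pre_ excludes exactly the inputs where A raises IndexError (empty data_set, or a row reaching past the sets pre-allocated from the first row).
import Mathlib
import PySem

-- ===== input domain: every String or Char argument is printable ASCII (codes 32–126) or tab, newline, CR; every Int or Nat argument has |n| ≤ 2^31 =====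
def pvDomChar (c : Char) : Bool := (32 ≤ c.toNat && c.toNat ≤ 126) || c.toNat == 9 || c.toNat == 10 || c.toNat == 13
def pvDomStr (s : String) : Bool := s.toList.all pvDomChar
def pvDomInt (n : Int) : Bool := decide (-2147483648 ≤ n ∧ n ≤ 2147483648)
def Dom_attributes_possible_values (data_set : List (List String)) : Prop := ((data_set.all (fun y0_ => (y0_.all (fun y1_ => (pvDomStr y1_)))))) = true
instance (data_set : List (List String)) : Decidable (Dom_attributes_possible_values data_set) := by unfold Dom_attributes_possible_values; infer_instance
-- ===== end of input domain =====

-- B flattens the table into one set of (column, value) cells and then filters that set per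
-- column, instead of A's row-major scatter into pre-allocated per-column sets (alternative
-- two-stage algorithm, same return value). Equivalence on the inputs where A returns (Pre_).

-- ===== PORT A =====
-- Literal port of A: pre-allocate one empty set per attribute of the first row, then for
-- each example add example[i] into set i for every i < len(example)-1.
-- data_set[0] raises IndexError on empty data_set, and attributes_values[i] raises IndexError
-- when a row reaches past the pre-allocated sets; both are outside Pre_ (headD/getD/modify are
-- total stand-ins, exact inside Pre_).
def attributes_possible_values (data_set : List (List String)) : List (List String) :=
  let attributes_values : List (PySem.Set String) :=
    (List.range ((data_set.headD []).length - 1)).foldl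
      (fun acc _ => acc ++ [PySem.Set.empty]) []
  data_set.foldl
    (fun acc ex =>
      (List.range (ex.length - 1)).foldl
        (fun a i => a.modify i (fun s => PySem.Set.add s (ex.getD i ""))) acc)
    attributes_values

-- ===== PORT B =====
-- Port of B: cells = {(i, v) for row for (i, v) in enumerate(row[:-1])} (row[:-1] = dropLast,
-- exact), then one set per column index, built by filtering the cell set (a set comprehension
-- over a set builds another set, so hash order does not affect the value).
-- len(data_set[0]) - 1 is ported with Nat subtraction: range(-1) and range(0) are both empty.
def attributes_possible_values_alt (data_set : List (List String)) : List (List String) :=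
  let cells : PySem.Set (Int × String) :=
    PySem.Set.ofList (data_set.flatMap (fun row => PySem.List.enumerate row.dropLast))
  (List.range ((data_set.headD []).length - 1)).map
    (fun (column : Nat) =>
      PySem.Set.ofList
        ((cells.filter (fun p => p.1 == (column : Int))).map (fun p => p.2)))

-- ===== PRECONDITION & SPEC =====
-- Exactly the inputs on which the Python A returns: data_set nonempty (else data_set[0]
-- raises IndexError) and no row reaches past the sets pre-allocated from the first row
-- (else attributes_values[i] raises IndexError); Nat '- 1' matches Python's empty range(-1).
def Pre_attributes_possible_values (data_set : List (List String)) : Prop :=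
  data_set ≠ [] ∧ ∀ row ∈ data_set, row.length - 1 ≤ (data_set.headD []).length - 1
instance (data_set : List (List String)) : Decidable (Pre_attributes_possible_values data_set) := by unfold Pre_attributes_possible_values; infer_instance

def pvWitness_attributes_possible_values : List (List String) :=
  [["a", "b", "yes"], ["c", "b", "no"], ["a", "d", "yes"]]

def Spec_attributes_possible_values (data_set : List (List String)) (out : List (List String)) : Prop := out = attributes_possible_values_alt data_set
instance (data_set : List (List String)) (out : List (List String)) : Decidable (Spec_attributes_possible_values data_set out) := by unfold Spec_attributes_possible_values; infer_instance

-- ===== CLAIM (what is proved, stated in full; the proofs are below) =====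
def Claim_equal_attributes_possible_values : Prop := ∀ (data_set : List (List String)), Dom_attributes_possible_values data_set → Pre_attributes_possible_values data_set → Spec_attributes_possible_values data_set (attributes_possible_values data_set)

-- ===== LEMMAS AND PROOFS =====

-- A's pre-allocation loop builds the same list as replicate.
theorem foldl_append_empty (m : Nat) :
    (List.range m).foldl (fun (acc : List (PySem.Set String)) _ => acc ++ [PySem.Set.empty]) []
      = List.replicate m PySem.Set.empty := by
  induction m with
  | zero => rfl
  | succ k ih =>
      rw [List.range_succ, List.foldl_append, ih, List.foldl_cons, List.foldl_nil,
        ← List.replicate_succ' (n := k)]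

-- Effect of A's inner (per-example) loop on position j of the accumulator.
theorem inner_getElem? (ex : List String) (acc : List (PySem.Set String)) (j : Nat) :
    ((List.range (ex.length - 1)).foldl
        (fun a i => a.modify i (fun s => PySem.Set.add s (ex.getD i ""))) acc)[j]?
      = acc[j]?.map (fun s => if j < ex.length - 1 then PySem.Set.add s (ex.getD j "") else s) := by
  generalize ex.length - 1 = m
  induction m with
  | zero => simp
  | succ k ih =>
      rw [List.range_succ, List.foldl_append, List.foldl_cons, List.foldl_nil,
        List.getElem?_modify, ih]
      rcases acc[j]? with _ | s
      · rfl
      · simp only [Option.map_some, Option.map_eq_map, Option.map_some]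
        rcases Nat.lt_trichotomy j k with h | h | h
        · simp [Nat.ne_of_gt h, h, Nat.lt_succ_of_lt h]
        · subst h; simp
        · have h1 : ¬ j < k := by omega
          have h2 : ¬ j < k + 1 := by omega
          simp [Nat.ne_of_lt h, h1, h2]

-- Row-major accumulation at position j equals the column-major fold started from acc[j].
theorem rows_getElem? (rows : List (List String)) (acc : List (PySem.Set String)) (j : Nat) :
    (rows.foldl
        (fun acc ex =>
          (List.range (ex.length - 1)).foldl
            (fun a i => a.modify i (fun s => PySem.Set.add s (ex.getD i ""))) acc)
        acc)[j]?
      = acc[j]?.map (fun s0 =>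
          rows.foldl (fun s row => if j < row.length - 1 then PySem.Set.add s (row.getD j "") else s) s0) := by
  induction rows generalizing acc with
  | nil => simp
  | cons ex rest ih =>
      rw [List.foldl_cons, ih, inner_getElem?]
      rcases acc[j]? with _ | s <;> simp

-- enumerate keeps strictly increasing indices, so filtering below the start gives nothing.
theorem filter_enumerate_lt {α : Type} (xs : List α) (s c : Int) (h : c < s) :
    (PySem.List.enumerate xs s).filter (fun p => p.1 == c) = [] := by
  induction xs generalizing s with
  | nil => rfl
  | cons x xs ih =>
      rw [PySem.List.enumerate_cons, List.filter_cons]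
      have hne : ¬ (s == c) = true := by simpa using (by omega : ¬ s = c)
      simp only [hne, Bool.false_eq_true, if_false]
      exact ih (s + 1) (by omega)

-- Filtering enumerate to one index picks exactly that element (or nothing).
theorem filter_enumerate {α : Type} (xs : List α) (s : Int) (j : Nat) :
    (PySem.List.enumerate xs s).filter (fun p => p.1 == s + (j : Int))
      = if h : j < xs.length then [(s + (j : Int), xs[j])] else [] := by
  induction xs generalizing s j with
  | nil => simp [PySem.List.enumerate]
  | cons x xs ih =>
      rw [PySem.List.enumerate_cons, List.filter_cons]
      cases j with
      | zero =>
          have h0 : (s == s + ((0 : Nat) : Int)) = true := by simp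
          simp only [h0, if_true]
          rw [filter_enumerate_lt xs (s + 1) (s + ((0 : Nat) : Int)) (by omega)]
          rw [dif_pos (by simp : (0 : Nat) < (x :: xs).length)]
          simp
      | succ k =>
          have hne : ¬ (s == s + ((k + 1 : Nat) : Int)) = true := by
            simp only [beq_iff_eq]; omega
          simp only [hne, Bool.false_eq_true, if_false]
          have hsh : s + ((k + 1 : Nat) : Int) = (s + 1) + (k : Int) := by push_cast; ring
          rw [hsh, ih (s + 1) k]
          by_cases h : k < xs.length
          · rw [dif_pos h, dif_pos (by simpa using Nat.succ_lt_succ h)]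
            simp only [List.getElem_cons_succ]
          · rw [dif_neg h, dif_neg (by simpa using fun hh => h (Nat.lt_of_succ_lt_succ hh))]

-- Filtering a Python set built from a list = the set of the filtered list.
theorem filter_foldl_add {α : Type} [BEq α] [LawfulBEq α] (p : α → Bool)
    (xs acc : List α) :
    (xs.foldl PySem.Set.add acc).filter p = (xs.filter p).foldl PySem.Set.add (acc.filter p) := by
  induction xs generalizing acc with
  | nil => rfl
  | cons x xs ih =>
      rw [List.foldl_cons, ih, List.filter_cons]
      have key : (PySem.Set.add acc x).filter p
          = if p x then PySem.Set.add (acc.filter p) x else acc.filter p := by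
        by_cases hx : x ∈ acc
        · have h1 : PySem.Set.add acc x = acc := by
            simp [PySem.Set.add, PySem.Set.contains, hx]
          rw [h1]
          by_cases hp : p x
          · have h2 : x ∈ acc.filter p := List.mem_filter.mpr ⟨hx, hp⟩
            rw [if_pos hp]
            simp [PySem.Set.add, PySem.Set.contains, h2]
          · rw [if_neg hp]
        · have h1 : PySem.Set.add acc x = acc ++ [x] := by
            simp [PySem.Set.add, PySem.Set.contains, hx]
          rw [h1, List.filter_append]
          by_cases hp : p x
          · have h2 : x ∉ acc.filter p := fun hh => hx (List.mem_filter.mp hh).1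
            rw [if_pos hp]
            simp [PySem.Set.add, PySem.Set.contains, h2, hp]
          · rw [if_neg hp]
            simp [hp]
      rw [key]
      by_cases hp : p x
      · simp only [hp, if_true, List.foldl_cons]
      · simp only [hp, Bool.false_eq_true, if_false]

-- Mapping .2 over a Python set of pairs whose first components are all equal
-- commutes with building the set.
theorem map_snd_foldl_add (c : Int) (xs acc : List (Int × String))
    (hxs : ∀ p ∈ xs, p.1 = c) (hacc : ∀ p ∈ acc, p.1 = c) :
    (xs.foldl PySem.Set.add acc).map (fun p => p.2)
      = (xs.map (fun p => p.2)).foldl PySem.Set.add (acc.map (fun p => p.2)) := by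
  induction xs generalizing acc with
  | nil => rfl
  | cons x xs ih =>
      rw [List.foldl_cons, List.map_cons, List.foldl_cons]
      have hx1 : x.1 = c := hxs x (by simp)
      have hmem : x ∈ acc ↔ x.2 ∈ acc.map (fun p => p.2) := by
        constructor
        · intro h; exact List.mem_map.mpr ⟨x, h, rfl⟩
        · intro h
          obtain ⟨q, hq, hq2⟩ := List.mem_map.mp h
          have : q = x := by
            have := hacc q hq
            cases x; cases q; simp_all
          exact this ▸ hq
      have step : (PySem.Set.add acc x).map (fun p => p.2)
          = PySem.Set.add (acc.map (fun p => p.2)) x.2 := by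
        by_cases hx : x ∈ acc
        · simp [PySem.Set.add, PySem.Set.contains, hx, hmem.mp hx]
        · have hx2 : x.2 ∉ acc.map (fun p => p.2) := fun hh => hx (hmem.mpr hh)
          simp [PySem.Set.add, PySem.Set.contains, hx, hx2]
      rw [← step]
      refine ih (PySem.Set.add acc x) (fun p hp => hxs p (by simp [hp])) ?_
      intro p hp
      rcases (PySem.Set.mem_add acc x p).mp hp with h | h
      · exact hacc p h
      · exact h ▸ hx1

-- Folding add over a list with no duplicates appends it wholesale.
theorem foldl_add_nodup {α : Type} [BEq α] [LawfulBEq α] (xs acc : List α)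
    (hnd : xs.Nodup) (hdisj : ∀ x ∈ xs, x ∉ acc) :
    xs.foldl PySem.Set.add acc = acc ++ xs := by
  induction xs generalizing acc with
  | nil => simp
  | cons x xs ih =>
      rw [List.foldl_cons]
      have hx : x ∉ acc := hdisj x (by simp)
      have h1 : PySem.Set.add acc x = acc ++ [x] := by
        simp [PySem.Set.add, PySem.Set.contains, hx]
      rw [h1, ih (acc ++ [x]) (List.Nodup.of_cons hnd)]
      · simp
      · intro y hy
        simp only [List.mem_append, List.mem_singleton]
        rintro (h | rfl)
        · exact hdisj y (by simp [hy]) h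
        · exact (List.nodup_cons.mp hnd).1 hy

-- set(xs) is idempotent.
theorem ofList_ofList {α : Type} [BEq α] [LawfulBEq α] (xs : List α) :
    PySem.Set.ofList (PySem.Set.ofList xs) = PySem.Set.ofList xs := by
  rw [PySem.Set.ofList_eq_foldl (PySem.Set.ofList xs)]
  exact foldl_add_nodup _ [] (PySem.Set.nodup_ofList xs) (by simp)

-- A's guarded column fold = fold of add over the flattened per-column cell values.
theorem guarded_fold_eq (j : Nat) (rows : List (List String)) (s : PySem.Set String) :
    rows.foldl (fun s row => if j < row.length - 1 then PySem.Set.add s (row.getD j "") else s) s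
      = (rows.flatMap (fun row =>
          ((PySem.List.enumerate row.dropLast).filter (fun p => p.1 == (j : Int))).map
            (fun p => p.2))).foldl PySem.Set.add s := by
  induction rows generalizing s with
  | nil => rfl
  | cons row rest ih =>
      rw [List.foldl_cons, List.flatMap_cons, List.foldl_append, ih]
      congr 1
      have hfe := filter_enumerate row.dropLast 0 j
      simp only [zero_add] at hfe
      rw [show PySem.List.enumerate row.dropLast = PySem.List.enumerate row.dropLast 0 from rfl,
        hfe]
      by_cases h : j < row.length - 1
      · have h' : j < row.dropLast.length := by simpa [List.length_dropLast] using h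
        rw [dif_pos h', if_pos h]
        have hj : j < row.length := by omega
        have hdl : row.dropLast[j] = row[j] := List.getElem_dropLast h'
        simp [hdl, List.getD_eq_getElem?_getD, List.getElem?_eq_getElem hj]
      · have h' : ¬ j < row.dropLast.length := by simpa [List.length_dropLast] using h
        rw [dif_neg h', if_neg h]
        rfl

-- ===== VERDICT (by name: the statement is the Claim_ definition above) =====
theorem attributes_possible_values_spec : Claim_equal_attributes_possible_values := by
  intro ds _ hpre
  obtain ⟨hne, _⟩ := hpre
  unfold Spec_attributes_possible_values attributes_possible_values attributes_possible_values_alt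
  apply List.ext_getElem?
  intro j
  rw [rows_getElem?, foldl_append_empty, List.getElem?_map]
  by_cases hj : j < (ds.headD []).length - 1
  · rw [List.getElem?_range hj, List.getElem?_replicate_of_lt hj]
    simp only [Option.map_some, Option.some.injEq]
    rw [guarded_fold_eq j ds PySem.Set.empty]
    set L := ds.flatMap (fun row => PySem.List.enumerate row.dropLast) with hL
    set q : Int × String → Bool := fun p => p.1 == (j : Int) with hq
    have hfst : ∀ p ∈ L.filter q, p.1 = (j : Int) := by
      intro p hp
      have := (List.mem_filter.mp hp).2
      simpa [hq] using this
    have h1 : (PySem.Set.ofList L).filter q = (L.filter q).foldl PySem.Set.add [] := by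
      rw [PySem.Set.ofList_eq_foldl L, filter_foldl_add q L []]
      rfl
    have h2 : ((L.filter q).foldl PySem.Set.add []).map (fun p => p.2)
        = ((L.filter q).map (fun p => p.2)).foldl PySem.Set.add [] :=
      map_snd_foldl_add (j : Int) _ [] hfst (by simp)
    rw [h1, h2, ← PySem.Set.ofList_eq_foldl, ofList_ofList, PySem.Set.ofList_eq_foldl]
    rw [hL, List.filter_flatMap, List.map_flatMap]
    rfl
  · rw [List.getElem?_eq_none (by simpa using hj), List.getElem?_eq_none (by simpa using hj)]
    rfl
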